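-- pv_equiv track=rewrite | github.com/Dipankar2105/Chikitsak-AI-Powered-Personalized-Health-Operating-System | backend/app/services/multimodal_ai_engine.py | _find_lab_symptom_correlations
-- ===== SOURCE A (Python) =====
-- from typing import Dict, Any, List, Optional
--
-- def _find_lab_symptom_correlations(
--     symptoms: List[str], abnormals: List[str],
-- ) -> List[str]:
--     """Find correlations between lab results and symptoms."""
--     correlations = []
--     abnormals_lower = " ".join(str(a).lower() for a in abnormals)
--
--     if "glucose" in abnormals_lower and any(s in ("thirst", "frequent_urination", "fatigue") for s in symptoms):
--         correlations.append("Elevated glucose consistent with reported diabetic symptoms")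
--     if "hemoglobin" in abnormals_lower and "fatigue" in symptoms:
--         correlations.append("Low hemoglobin explains reported fatigue — possible anemia")
--     if "wbc" in abnormals_lower and "fever" in symptoms:
--         correlations.append("Elevated WBC confirms infectious/inflammatory process with fever")
--     if "tsh" in abnormals_lower and any(s in ("fatigue", "weight_gain", "cold_intolerance") for s in symptoms):
--         correlations.append("Thyroid function abnormality correlates with reported symptoms")
--     if "creatinine" in abnormals_lower and "edema" in symptoms:
--         correlations.append("Elevated creatinine with edema suggests renal evaluation needed")
--
--     return correlations
-- ===== SOURCE B (Python) =====
-- # B: inverted symptom->rule index + one filtered pass over the keyword table (alternative decomposition).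
-- _MESSAGES = [
--     "Elevated glucose consistent with reported diabetic symptoms",
--     "Low hemoglobin explains reported fatigue \u2014 possible anemia",
--     "Elevated WBC confirms infectious/inflammatory process with fever",
--     "Thyroid function abnormality correlates with reported symptoms",
--     "Elevated creatinine with edema suggests renal evaluation needed",
-- ]
-- _KEYWORDS = ["glucose", "hemoglobin", "wbc", "tsh", "creatinine"]
-- _SYMPTOM_INDEX = {
--     "thirst": (0,),
--     "frequent_urination": (0,),
--     "fatigue": (0, 1, 3),
--     "fever": (2,),
--     "weight_gain": (3,),
--     "cold_intolerance": (3,),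
--     "edema": (4,),
-- }
--
-- def _find_lab_symptom_correlations(symptoms, abnormals):
--     abnormals_lower = " ".join(str(a).lower() for a in abnormals)
--     triggered = {i for s in symptoms for i in _SYMPTOM_INDEX.get(s, ())}
--     return [_MESSAGES[i] for i, k in enumerate(_KEYWORDS)
--             if k in abnormals_lower and i in triggered]
-- ===== Notes on version B (the rewrite author's own statement) =====
-- stated objective: alternative
-- what changed: Instead of five hard-coded branches each re-scanning the symptom list, B builds an inverted symptom-to-rule-index set in one pass over symptoms, then emits messages in a single filtered pass over an enumerated keyword table.
import Mathlib
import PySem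

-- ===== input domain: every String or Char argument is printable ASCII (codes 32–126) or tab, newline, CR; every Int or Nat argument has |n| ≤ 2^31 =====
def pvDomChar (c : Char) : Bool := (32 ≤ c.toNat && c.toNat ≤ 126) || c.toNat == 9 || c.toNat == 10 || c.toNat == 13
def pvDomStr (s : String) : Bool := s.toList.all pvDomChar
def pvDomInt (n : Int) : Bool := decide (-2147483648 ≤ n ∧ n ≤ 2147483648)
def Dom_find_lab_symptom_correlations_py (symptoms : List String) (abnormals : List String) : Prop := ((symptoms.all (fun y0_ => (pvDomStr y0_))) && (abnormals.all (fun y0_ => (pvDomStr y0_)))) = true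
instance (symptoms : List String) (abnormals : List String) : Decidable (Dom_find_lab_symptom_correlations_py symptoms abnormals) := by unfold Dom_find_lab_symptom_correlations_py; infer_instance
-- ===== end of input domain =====

-- B replaces A's five hard-coded branches by an inverted symptom->rule-index set built in one pass,
-- then a single filtered pass over the keyword table (alternative decomposition, same cost).

-- ===== PORT A =====
def find_lab_symptom_correlations_py (symptoms : List String) (abnormals : List String) : List String :=
  let abnormals_lower := PySem.Str.join " " (abnormals.map (fun a => PySem.Str.lower a))
  let correlations : List String := []
  let correlations := if PySem.Str.isIn "glucose" abnormals_lower &&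
      symptoms.any (fun s => ["thirst", "frequent_urination", "fatigue"].contains s) then
    correlations ++ ["Elevated glucose consistent with reported diabetic symptoms"] else correlations
  let correlations := if PySem.Str.isIn "hemoglobin" abnormals_lower && symptoms.contains "fatigue" then
    correlations ++ ["Low hemoglobin explains reported fatigue — possible anemia"] else correlations
  let correlations := if PySem.Str.isIn "wbc" abnormals_lower && symptoms.contains "fever" then
    correlations ++ ["Elevated WBC confirms infectious/inflammatory process with fever"] else correlations
  let correlations := if PySem.Str.isIn "tsh" abnormals_lower &&
      symptoms.any (fun s => ["fatigue", "weight_gain", "cold_intolerance"].contains s) then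
    correlations ++ ["Thyroid function abnormality correlates with reported symptoms"] else correlations
  let correlations := if PySem.Str.isIn "creatinine" abnormals_lower && symptoms.contains "edema" then
    correlations ++ ["Elevated creatinine with edema suggests renal evaluation needed"] else correlations
  correlations

-- ===== PORT B =====
def pvMessages : List String :=
  ["Elevated glucose consistent with reported diabetic symptoms",
   "Low hemoglobin explains reported fatigue — possible anemia",
   "Elevated WBC confirms infectious/inflammatory process with fever",
   "Thyroid function abnormality correlates with reported symptoms",
   "Elevated creatinine with edema suggests renal evaluation needed"]

def pvKeywords : List String := ["glucose", "hemoglobin", "wbc", "tsh", "creatinine"]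

def pvSymptomIndex : PySem.Dict String (List Int) :=
  PySem.Dict.ofList
    [("thirst", [0]), ("frequent_urination", [0]), ("fatigue", [0, 1, 3]),
     ("fever", [2]), ("weight_gain", [3]), ("cold_intolerance", [3]), ("edema", [4])]

def find_lab_symptom_correlations_py_alt (symptoms : List String) (abnormals : List String) : List String :=
  let abnormals_lower := PySem.Str.join " " (abnormals.map (fun a => PySem.Str.lower a))
  -- {i for s in symptoms for i in _SYMPTOM_INDEX.get(s, ())}
  let triggered : PySem.Set Int :=
    PySem.Set.ofList (symptoms.flatMap (fun s => PySem.Dict.getD pvSymptomIndex s []))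
  -- [_MESSAGES[i] for i, k in enumerate(_KEYWORDS) if k in abnormals_lower and i in triggered]
  -- _MESSAGES[i]: i is an enumerate index of the same-length _KEYWORDS, so the "" default is never hit (exact)
  (PySem.List.enumerate pvKeywords 0).filterMap (fun ik =>
    if PySem.Str.isIn ik.2 abnormals_lower && PySem.Set.contains triggered ik.1 then
      some (PySem.List.pyGetD pvMessages ik.1 "") else none)

-- ===== PRECONDITION & SPEC =====
def Spec_find_lab_symptom_correlations_py (symptoms : List String) (abnormals : List String) (out : List String) : Prop := out = find_lab_symptom_correlations_py_alt symptoms abnormals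
instance (symptoms : List String) (abnormals : List String) (out : List String) : Decidable (Spec_find_lab_symptom_correlations_py symptoms abnormals out) := by unfold Spec_find_lab_symptom_correlations_py; infer_instance

-- ===== CLAIM (what is proved, stated in full; the proofs are below) =====
def Claim_equal_find_lab_symptom_correlations_py : Prop := ∀ (symptoms : List String) (abnormals : List String), Dom_find_lab_symptom_correlations_py symptoms abnormals → Spec_find_lab_symptom_correlations_py symptoms abnormals (find_lab_symptom_correlations_py symptoms abnormals)

-- ===== LEMMAS AND PROOFS =====
-- `any(s in (x,))` over a singleton trigger tuple is list membership of x
theorem pv_any_singleton (l : List String) (x : String) :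
    (l.any fun s => [x].contains s) = l.contains x := by
  rw [Bool.eq_iff_iff]
  simp

-- membership of a rule index in B's triggered set equals A's per-rule symptom test
theorem pv_trig (symptoms : List String) (i : Int) (p : String → Bool)
    (h : ∀ s, (i ∈ PySem.Dict.getD pvSymptomIndex s []) ↔ p s = true) :
    PySem.Set.contains (PySem.Set.ofList (symptoms.flatMap (fun s => PySem.Dict.getD pvSymptomIndex s []))) i
      = symptoms.any p := by
  rw [Bool.eq_iff_iff]
  simp [PySem.Set.mem_ofList, List.mem_flatMap, List.any_eq_true, h]

theorem pv_idx0 (s : String) : (0 : Int) ∈ PySem.Dict.getD pvSymptomIndex s [] ↔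
    (["thirst", "frequent_urination", "fatigue"].contains s) = true := by
  simp only [pvSymptomIndex, PySem.Dict.ofList, PySem.Dict.update, List.foldl_cons,
    List.foldl_nil, PySem.Dict.getD_insert, PySem.Dict.getD_empty]
  split_ifs <;> simp_all

theorem pv_idx1 (s : String) : (1 : Int) ∈ PySem.Dict.getD pvSymptomIndex s [] ↔
    (["fatigue"].contains s) = true := by
  simp only [pvSymptomIndex, PySem.Dict.ofList, PySem.Dict.update, List.foldl_cons,
    List.foldl_nil, PySem.Dict.getD_insert, PySem.Dict.getD_empty]
  split_ifs <;> simp_all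

theorem pv_idx2 (s : String) : (2 : Int) ∈ PySem.Dict.getD pvSymptomIndex s [] ↔
    (["fever"].contains s) = true := by
  simp only [pvSymptomIndex, PySem.Dict.ofList, PySem.Dict.update, List.foldl_cons,
    List.foldl_nil, PySem.Dict.getD_insert, PySem.Dict.getD_empty]
  split_ifs <;> simp_all

theorem pv_idx3 (s : String) : (3 : Int) ∈ PySem.Dict.getD pvSymptomIndex s [] ↔
    (["fatigue", "weight_gain", "cold_intolerance"].contains s) = true := by
  simp only [pvSymptomIndex, PySem.Dict.ofList, PySem.Dict.update, List.foldl_cons,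
    List.foldl_nil, PySem.Dict.getD_insert, PySem.Dict.getD_empty]
  split_ifs <;> simp_all

theorem pv_idx4 (s : String) : (4 : Int) ∈ PySem.Dict.getD pvSymptomIndex s [] ↔
    (["edema"].contains s) = true := by
  simp only [pvSymptomIndex, PySem.Dict.ofList, PySem.Dict.update, List.foldl_cons,
    List.foldl_nil, PySem.Dict.getD_insert, PySem.Dict.getD_empty]
  split_ifs <;> simp_all

-- B's filtered pass over the enumerated keyword table, written out as five appended ifs
theorem pv_B (al : String) (tr : PySem.Set Int) :
    ((PySem.List.enumerate pvKeywords 0).filterMap (fun ik =>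
      if PySem.Str.isIn ik.2 al && PySem.Set.contains tr ik.1 then
        some (PySem.List.pyGetD pvMessages ik.1 "") else none))
    = (if PySem.Str.isIn "glucose" al && PySem.Set.contains tr 0 then
        ["Elevated glucose consistent with reported diabetic symptoms"] else []) ++
      (if PySem.Str.isIn "hemoglobin" al && PySem.Set.contains tr 1 then
        ["Low hemoglobin explains reported fatigue — possible anemia"] else []) ++
      (if PySem.Str.isIn "wbc" al && PySem.Set.contains tr 2 then
        ["Elevated WBC confirms infectious/inflammatory process with fever"] else []) ++
      (if PySem.Str.isIn "tsh" al && PySem.Set.contains tr 3 then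
        ["Thyroid function abnormality correlates with reported symptoms"] else []) ++
      (if PySem.Str.isIn "creatinine" al && PySem.Set.contains tr 4 then
        ["Elevated creatinine with edema suggests renal evaluation needed"] else []) := by
  have e : PySem.List.enumerate pvKeywords 0 =
      [(0, "glucose"), (1, "hemoglobin"), (2, "wbc"), (3, "tsh"), (4, "creatinine")] := by decide
  rw [e]
  simp only [List.filterMap_cons, List.filterMap_nil]
  split_ifs <;> rfl

-- ===== VERDICT (by name: the statement is the Claim_ definition above) =====
theorem find_lab_symptom_correlations_py_spec : Claim_equal_find_lab_symptom_correlations_py := by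
  intro symptoms abnormals _
  unfold Spec_find_lab_symptom_correlations_py
  simp only [find_lab_symptom_correlations_py, find_lab_symptom_correlations_py_alt]
  rw [pv_B]
  rw [pv_trig symptoms 0 _ pv_idx0, pv_trig symptoms 1 _ pv_idx1, pv_trig symptoms 2 _ pv_idx2,
      pv_trig symptoms 3 _ pv_idx3, pv_trig symptoms 4 _ pv_idx4]
  rw [pv_any_singleton, pv_any_singleton, pv_any_singleton]
  split_ifs <;> rfl
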